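-- pv_equiv track=rewrite | github.com/Rafael-Remigio/RushHour-AI | commonMethods.py | stringToGridA
-- ===== SOURCE A (Python) =====
-- import math
--
-- def stringToGridA(mapString):
--     """Initializes Map Tuple from a MapString Representation and initializes cost at 0"""
--     mapString = mapString.split(" ")[1]
--     grid_size = int(math.sqrt(len(mapString)))
--     pieceSet = []
--     grid = []
--     line = []
--     for i, pos in enumerate(mapString):
--
--         # Creates an Array with all the diferent Pieces
--         if (pos not in {"o","x"} ) and (pos not in pieceSet):
--             pieceSet.append(pos)
--
--         #
--         line.append(pos)
--         if (i + 1) % grid_size == 0: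
--             grid.append(line)
--             line = []
--
--     return (grid,pieceSet,"",0)
-- ===== SOURCE B (Python) =====
-- import math
--
-- def stringToGridA(mapString):
--     """Initializes Map Tuple from a MapString Representation and initializes cost at 0"""
--     s = mapString.split(" ")[1]
--     n = int(math.sqrt(len(s)))
--     grid = [list(s[r * n:(r + 1) * n]) for r in range(len(s) // n)] if s else []
--     pieceSet = list(dict.fromkeys(c for c in s if c not in ("o", "x")))
--     return (grid, pieceSet, "", 0)
-- ===== Notes on version B (the rewrite author's own statement) =====
-- stated objective: alternative
-- what changed: A's single interleaved loop (modulo counter building rows while deduplicating pieces on the fly) is replaced by two independent passes: the grid is built by index slicing the token into len//n full rows, and the piece list by an ordered dedup (dict.fromkeys) of the filtered characters.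
import Mathlib
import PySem

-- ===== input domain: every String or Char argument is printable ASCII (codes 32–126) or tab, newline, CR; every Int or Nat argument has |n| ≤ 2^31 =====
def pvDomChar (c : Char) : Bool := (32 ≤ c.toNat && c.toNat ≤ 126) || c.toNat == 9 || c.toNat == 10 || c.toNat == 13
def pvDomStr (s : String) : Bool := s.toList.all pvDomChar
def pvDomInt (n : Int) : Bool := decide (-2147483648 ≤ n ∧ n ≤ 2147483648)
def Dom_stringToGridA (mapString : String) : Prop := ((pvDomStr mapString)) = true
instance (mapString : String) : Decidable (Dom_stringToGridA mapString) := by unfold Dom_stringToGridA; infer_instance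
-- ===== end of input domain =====

-- B replaces A's single interleaved modulo-counter loop by two independent passes
-- (index slicing into full rows + ordered dedup of the filtered characters): alternative decomposition, same cost class.

-- a Python 1-character string (iteration over a str yields these)
def pvToS (c : Char) : String := String.ofList [c]

-- ===== PORT A =====
-- the for-loop of A: state (i, pieceSet, grid, line); appends ported as ++ [·]
def pvLoopA (n : Nat) : Nat → List String → List (List String) → List String → List Char →
    List (List String) × List String
  | _, ps, grid, _, [] => (grid, ps)
  | i, ps, grid, line, c :: rest =>
    let ps' := if c ∉ ['o', 'x'] ∧ pvToS c ∉ ps then ps ++ [pvToS c] else ps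
    let line' := line ++ [pvToS c]
    if (i + 1) % n = 0 then pvLoopA n (i + 1) ps' (grid ++ [line']) [] rest
    else pvLoopA n (i + 1) ps' grid line' rest

def stringToGridA (mapString : String) : List (List String) × List String × String × Int :=
  -- mapString.split(" ")[1]; none = IndexError (no space), excluded by Pre_
  match PySem.List.pyGet? ((PySem.Str.split? mapString " ").getD []) 1 with
  | none => ([], [], "", 0)
  | some tok =>
    let s := tok.toList
    -- int(math.sqrt(len(s))): floor square root (float sqrt is exact-floor for these lengths)
    let n := Nat.sqrt s.length
    let r := pvLoopA n 0 [] [] [] s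
    (r.1, r.2, "", 0)

-- ===== PORT B =====
def stringToGridA_alt (mapString : String) : List (List String) × List String × String × Int :=
  match PySem.List.pyGet? ((PySem.Str.split? mapString " ").getD []) 1 with
  | none => ([], [], "", 0)
  | some tok =>
    let s := tok.toList
    let n := Nat.sqrt s.length
    -- [list(s[r*n:(r+1)*n]) for r in range(len(s)//n)] if s else []   (slice with nonneg bounds = drop/take)
    let grid := if s.isEmpty then []
      else (List.range (s.length / n)).map (fun r => ((s.drop (r * n)).take n).map pvToS)
    -- list(dict.fromkeys(c for c in s if c not in ("o","x")))
    let pieceSet := PySem.List.dedup ((s.filter (fun c => decide (c ∉ ['o', 'x']))).map pvToS)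
    (grid, pieceSet, "", 0)

-- ===== PRECONDITION & SPEC =====
-- Pre_ excludes inputs containing no space character: on those, indexing the split result raises IndexError in A (and likewise in B).
def Pre_stringToGridA (mapString : String) : Prop := ' ' ∈ mapString.toList
instance (mapString : String) : Decidable (Pre_stringToGridA mapString) := by
  unfold Pre_stringToGridA; infer_instance
def pvWitness_stringToGridA : String := "M ooABxorxC"
def Spec_stringToGridA (mapString : String) (out : List (List String) × List String × String × Int) : Prop := out = stringToGridA_alt mapString
instance (mapString : String) (out : List (List String) × List String × String × Int) : Decidable (Spec_stringToGridA mapString out) := by unfold Spec_stringToGridA; infer_instance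

-- ===== CLAIM (what is proved, stated in full; the proofs are below) =====
def Claim_equal_stringToGridA : Prop := ∀ (mapString : String), Dom_stringToGridA mapString → Pre_stringToGridA mapString → Spec_stringToGridA mapString (stringToGridA mapString)

-- ===== LEMMAS AND PROOFS =====

-- recursive characterisation of the rows A's loop flushes (proof helper)
def pvChunk (n : Nat) : List String → List Char → List (List String)
  | _, [] => []
  | line, c :: rest =>
    if line.length + 1 = n then (line ++ [pvToS c]) :: pvChunk n [] rest
    else pvChunk n (line ++ [pvToS c]) rest

theorem pvUpdate_step (ps : List String) (c : Char) (rest : List Char) :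
    PySem.Set.update (if c ∉ ['o', 'x'] then PySem.Set.add ps (pvToS c) else ps)
        ((rest.filter (fun c => decide (c ∉ ['o', 'x']))).map pvToS) =
      PySem.Set.update ps (((c :: rest).filter (fun c => decide (c ∉ ['o', 'x']))).map pvToS) := by
  by_cases hox : c ∉ ['o', 'x']
  · have hox' : ¬c = 'o' ∧ ¬c = 'x' := by simpa using hox
    rw [if_pos hox]
    have : (c :: rest).filter (fun c => decide (c ∉ ['o', 'x'])) =
        c :: rest.filter (fun c => decide (c ∉ ['o', 'x'])) := by
      simp [hox']
    rw [this, List.map_cons, PySem.Set.update_cons]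
  · have hmem : c ∈ ['o', 'x'] := not_not.mp hox
    rw [if_neg hox]
    have : (c :: rest).filter (fun c => decide (c ∉ ['o', 'x'])) =
        rest.filter (fun c => decide (c ∉ ['o', 'x'])) := by
      simp only [List.filter_cons]
      simp only [List.mem_cons, List.not_mem_nil, or_false] at hmem
      rcases hmem with h | h <;> simp [h]
    rw [this]

theorem pvLoopA_eq (n : Nat) (hn : 0 < n) :
    ∀ (s : List Char) (i : Nat) (ps : List String) (grid : List (List String)) (line : List String),
      i % n = line.length →
      pvLoopA n i ps grid line s =
        (grid ++ pvChunk n line s,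
         PySem.Set.update ps ((s.filter (fun c => decide (c ∉ ['o', 'x']))).map pvToS)) := by
  intro s
  induction s with
  | nil => intro i ps grid line _; simp [pvLoopA, pvChunk, PySem.Set.update]
  | cons c rest ih =>
    intro i ps grid line hi
    have hlt : line.length < n := hi ▸ Nat.mod_lt i hn
    have hps' : (if c ∉ ['o', 'x'] ∧ pvToS c ∉ ps then ps ++ [pvToS c] else ps) =
        (if c ∉ ['o', 'x'] then PySem.Set.add ps (pvToS c) else ps) := by
      by_cases hox : c ∉ ['o', 'x']
      · have hox' : ¬c = 'o' ∧ ¬c = 'x' := by simpa using hox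
        by_cases hm : pvToS c ∈ ps <;>
          simp [hox, hm, PySem.Set.add, PySem.Set.contains, List.contains_eq_mem]
      · have hmem : c ∈ ['o', 'x'] := not_not.mp hox
        have h' : ¬(¬c = 'o' ∧ ¬c = 'x') := by simpa using hox
        simp [h']
    by_cases hflush : line.length + 1 = n
    · have hmod : (i + 1) % n = 0 := by
        have hdm := Nat.div_add_mod i n
        have hdist : n * (i / n + 1) = n * (i / n) + n := by ring
        have : i + 1 = n * (i / n + 1) := by omega
        rw [this, Nat.mul_mod_right]
      simp only [pvLoopA, hps', hmod, pvChunk, if_pos hflush]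
      rw [ih (i + 1) _ _ [] (by simp [hmod]), pvUpdate_step]
      simp [List.append_assoc]
    · have hmod : (i + 1) % n = line.length + 1 := by
        have hdm := Nat.div_add_mod i n
        have h1 : i + 1 = n * (i / n) + (line.length + 1) := by omega
        rw [h1, Nat.mul_add_mod]
        exact Nat.mod_eq_of_lt (by omega)
      have hmodne : ¬ (i + 1) % n = 0 := by omega
      simp only [pvLoopA, hps', if_neg hmodne, pvChunk, if_neg hflush]
      rw [ih (i + 1) _ _ (line ++ [pvToS c]) (by simp [hmod]), pvUpdate_step]

-- one full row peels off the front of the range-map chunk form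
theorem pvRange_chunk_cons (n : Nat) (hn : 0 < n) (a rest : List Char) (ha : a.length = n) :
    (List.range ((a ++ rest).length / n)).map
        (fun r => (((a ++ rest).drop (r * n)).take n).map pvToS) =
      (a.map pvToS) ::
        (List.range (rest.length / n)).map (fun r => ((rest.drop (r * n)).take n).map pvToS) := by
  subst ha
  have hdiv : (a ++ rest).length / a.length = rest.length / a.length + 1 := by
    rw [List.length_append, Nat.add_comm, Nat.add_div_right _ hn]
  rw [hdiv, List.range_succ_eq_map]
  simp only [List.map_cons, List.map_map]
  congr 1
  · rw [Nat.zero_mul, List.drop_zero, List.take_left]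
  · apply List.map_congr_left
    intro r _
    simp only [Function.comp_apply, Nat.succ_eq_add_one]
    have h1 : (r + 1) * a.length = a.length + r * a.length := by ring
    rw [h1, List.drop_append, List.drop_eq_nil_of_le (Nat.le_add_right _ _),
        List.nil_append, Nat.add_sub_cancel_left]

theorem pvChunk_eq (n : Nat) (hn : 0 < n) :
    ∀ (s : List Char) (line : List Char), line.length < n →
      pvChunk n (line.map pvToS) s =
        (List.range ((line ++ s).length / n)).map
          (fun r => (((line ++ s).drop (r * n)).take n).map pvToS) := by
  intro s
  induction s with
  | nil =>
    intro line hlt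
    simp [pvChunk, Nat.div_eq_of_lt (by simpa using hlt)]
  | cons c rest ih =>
    intro line hlt
    by_cases hflush : line.length + 1 = n
    · have h0 : pvChunk n (line.map pvToS) (c :: rest) =
          ((line ++ [c]).map pvToS) :: pvChunk n (List.map pvToS []) rest := by
        simp [pvChunk, hflush]
      have hsplit : line ++ c :: rest = (line ++ [c]) ++ rest := by simp
      rw [h0, hsplit, pvRange_chunk_cons n hn (line ++ [c]) rest (by simp; omega),
          ih [] hn]
      simp
    · have h0 : pvChunk n (line.map pvToS) (c :: rest) =
          pvChunk n ((line ++ [c]).map pvToS) rest := by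
        simp [pvChunk, hflush]
      have hsplit : line ++ c :: rest = (line ++ [c]) ++ rest := by simp
      rw [h0, hsplit, ih (line ++ [c]) (by simp; omega)]

-- ===== VERDICT (by name: the statement is the Claim_ definition above) =====
theorem stringToGridA_spec : Claim_equal_stringToGridA := by
  intro mapString _ _
  unfold Spec_stringToGridA stringToGridA stringToGridA_alt
  cases h : PySem.List.pyGet? ((PySem.Str.split? mapString " ").getD []) 1 with
  | none => rfl
  | some tok =>
    by_cases hne : tok.toList = []
    · simp [hne, pvLoopA]
    · have hn : 0 < Nat.sqrt tok.toList.length :=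
        Nat.sqrt_pos.mpr (List.length_pos_of_ne_nil hne)
      have hloop := pvLoopA_eq _ hn tok.toList 0 [] [] [] (by simp)
      have hchunk := pvChunk_eq _ hn tok.toList [] hn
      simp only [List.map_nil, List.nil_append] at hloop hchunk
      simp only [hloop, hchunk]
      simp [List.isEmpty_iff, hne, PySem.Set.update_nil_left, PySem.List.dedup_eq_ofList]
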